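-- pv_equiv track=rewrite | github.com/nathanaelcheramlak/A2SV-Inperson | A2SV G6 - Round #1 24-Feb-2025/E - From S To T 281445.py | solve
-- ===== SOURCE A (Python) =====
-- from collections import Counter, defaultdict, deque
--
-- def solve(s, t, p):
--     # Check if s is a sub-sequence of t
--     pt = 0
--     for letter in s:
--         while pt < len(t) and t[pt] != letter:
--             pt += 1
--         if pt >= len(t) or t[pt] != letter:
--             return False
--         else:
--             pt += 1
--
--     bank = Counter(s + p)
--
--     for letter in t:
--         if letter in bank:
--             bank[letter] -= 1
--         else:
--             return False
--
--         if bank[letter] == 0: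
--             del bank[letter]
--
--     return True
-- ===== SOURCE B (Python) =====
-- def solve(s, t, p):
--     # Both checks are the same test: "a embeds as a subsequence of b".
--     # For the letter-coverage check this works because multiset containment
--     # of t in s+p is exactly subsequence containment of sorted(t) in sorted(s+p).
--     def embeds(a, b):
--         cur = -1
--         for ch in a:
--             cur = b.find(ch, cur + 1)
--             if cur < 0:
--                 return False
--         return True
--     return embeds(s, t) and embeds("".join(sorted(t)), "".join(sorted(s + p)))
-- ===== Notes on version B (the rewrite author's own statement) =====
-- stated objective: alternative
-- what changed: B reduces both halves to a single 'embeds as a subsequence' helper driven by str.find with a start offset: the subsequence test calls it on (s, t), and the letter-coverage test drops Counter entirely and calls the same helper on (sorted(t), sorted(s+p)), using the fact that multiset containment equals subsequence containment of the sorted strings.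
import Mathlib
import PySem

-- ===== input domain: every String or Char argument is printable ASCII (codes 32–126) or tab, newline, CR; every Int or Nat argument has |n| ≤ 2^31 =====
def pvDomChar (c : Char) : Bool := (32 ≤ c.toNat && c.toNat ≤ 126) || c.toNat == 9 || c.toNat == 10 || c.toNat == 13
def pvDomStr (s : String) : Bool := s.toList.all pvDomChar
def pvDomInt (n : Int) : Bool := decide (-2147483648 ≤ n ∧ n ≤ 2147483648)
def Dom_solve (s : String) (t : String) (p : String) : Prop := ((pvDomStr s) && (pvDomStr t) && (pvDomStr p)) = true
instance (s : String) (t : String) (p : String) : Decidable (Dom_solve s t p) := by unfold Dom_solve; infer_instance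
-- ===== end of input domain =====

-- B reduces both of A's checks to one 'embeds as a subsequence' helper driven by
-- str.find with a start offset: on (s, t) directly, and on (sorted(t), sorted(s+p))
-- in place of A's Counter consumption (an alternative decomposition, not faster).

-- ===== PORT A =====
-- inner 'while pt < len(t) and t[pt] != letter: pt += 1'
def pvSkipA (t : List Char) (c : Char) (pt : Nat) : Nat :=
  if h : pt < t.length then
    if t[pt] ≠ c then pvSkipA t c (pt + 1) else pt
  else pt
termination_by t.length - pt

-- outer 'for letter in s' loop with early return False
def pvSubA (t : List Char) : List Char → Nat → Bool
  | [], _ => true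
  | c :: rest, pt =>
    let pt' := pvSkipA t c pt
    if h : pt' < t.length then
      if t[pt'] ≠ c then false else pvSubA t rest (pt' + 1)
    else false

-- 'for letter in t' loop consuming the bank, with early return False
def pvCovA : List Char → PySem.Dict Char Int → Bool
  | [], _ => true
  | c :: rest, bank =>
    if bank.contains c then
      let bank1 := bank.modify c 0 (· - 1)
      let bank2 := if bank1.getD c 0 == 0 then bank1.erase c else bank1
      pvCovA rest bank2
    else false

def solve (s : String) (t : String) (p : String) : Bool :=
  if pvSubA t.toList s.toList 0 then
    pvCovA t.toList (PySem.Dict.counter (s.toList ++ p.toList))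
  else false

-- ===== PORT B =====
-- 'def embeds(a, b): cur = -1; for ch in a: cur = b.find(ch, cur+1); if cur < 0: return False; return True'
def pvEmbedsB (b : List Char) : List Char → Int → Bool
  | [], _ => true
  | c :: rest, cur =>
    let cur' := PySem.Chars.findFrom b [c] (cur + 1) none
    if cur' < 0 then false else pvEmbedsB b rest cur'

def solve_alt (s : String) (t : String) (p : String) : Bool :=
  pvEmbedsB t.toList s.toList (-1)
    && pvEmbedsB (PySem.List.sorted (s.toList ++ p.toList) (fun c => c))
         (PySem.List.sorted t.toList (fun c => c)) (-1)

-- ===== PRECONDITION & SPEC =====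
def Spec_solve (s : String) (t : String) (p : String) (out : Bool) : Prop := out = solve_alt s t p
instance (s : String) (t : String) (p : String) (out : Bool) : Decidable (Spec_solve s t p out) := by unfold Spec_solve; infer_instance

-- ===== CLAIM (what is proved, stated in full; the proofs are below) =====
def Claim_equal_solve : Prop := ∀ (s : String) (t : String) (p : String), Dom_solve s t p → Spec_solve s t p (solve s t p)

-- ===== LEMMAS AND PROOFS =====

-- canonical greedy subsequence check, used only by the proofs
def pvIsSub : List Char → List Char → Bool
  | [], _ => true
  | _ :: _, [] => false
  | c :: r, d :: u => if c = d then pvIsSub r u else pvIsSub (c :: r) u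

lemma pvSkipA_step1 {t : List Char} {c : Char} {x : Nat} (hx : x < t.length)
    (hne : t[x] ≠ c) : pvSkipA t c x = pvSkipA t c (x + 1) := by
  rw [pvSkipA]; simp [hx, hne]

lemma pvSkipA_step2 {t : List Char} {c : Char} {x : Nat} (hx : x < t.length)
    (heq : t[x] = c) : pvSkipA t c x = x := by
  rw [pvSkipA]; simp [hx, heq]

lemma pvSkipA_step3 {t : List Char} {c : Char} {x : Nat} (hx : ¬ x < t.length) :
    pvSkipA t c x = x := by
  rw [pvSkipA]; simp [hx]

lemma pvSkipA_get (t : List Char) (c : Char) : ∀ (pt : Nat),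
    pvSkipA t c pt < t.length → t[pvSkipA t c pt]? = some c := by
  intro pt
  induction pt using pvSkipA.induct (t := t) (c := c) with
  | case1 x hx hne ih =>
    intro h
    rw [pvSkipA_step1 hx hne] at h ⊢
    exact ih h
  | case2 x hx hne =>
    intro _
    rw [not_not] at hne
    rw [pvSkipA_step2 hx hne, List.getElem?_eq_getElem hx, hne]
  | case3 x hx =>
    intro h
    rw [pvSkipA_step3 hx] at h
    exact absurd h hx

lemma pvSkipA_ge (t : List Char) (c : Char) : ∀ (pt : Nat), pt ≤ pvSkipA t c pt := by
  intro pt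
  induction pt using pvSkipA.induct (t := t) (c := c) with
  | case1 x hx hne ih => rw [pvSkipA_step1 hx hne]; omega
  | case2 x hx hne => rw [not_not] at hne; rw [pvSkipA_step2 hx hne]
  | case3 x hx => rw [pvSkipA_step3 hx]

lemma pvSkipA_min (t : List Char) (c : Char) : ∀ (pt : Nat) (i : Nat),
    pt ≤ i → i < pvSkipA t c pt → t[i]? ≠ some c := by
  intro pt
  induction pt using pvSkipA.induct (t := t) (c := c) with
  | case1 x hx hne ih =>
    intro i hle hlt
    rw [pvSkipA_step1 hx hne] at hlt
    rcases Nat.eq_or_lt_of_le hle with h | h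
    · subst h
      rw [List.getElem?_eq_getElem hx]
      simp only [ne_eq, Option.some.injEq]
      exact hne
    · exact ih i h hlt
  | case2 x hx hne =>
    intro i hle hlt
    rw [not_not] at hne
    rw [pvSkipA_step2 hx hne] at hlt
    omega
  | case3 x hx =>
    intro i hle hlt
    rw [pvSkipA_step3 hx] at hlt
    omega

-- singleton prefix/infix bridges
lemma pvSingleton_prefix_iff (c : Char) (l : List Char) : [c] <+: l ↔ l.head? = some c := by
  cases l with
  | nil => simp
  | cons d u => simp [List.cons_prefix_cons, eq_comm]

lemma pvSingleton_infix_iff (c : Char) (l : List Char) : [c] <:+: l ↔ c ∈ l := by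
  constructor
  · intro h
    exact List.singleton_sublist.mp h.sublist
  · intro h
    rcases List.mem_iff_append.mp h with ⟨u, v, rfl⟩
    exact ⟨u, v, by simp⟩

-- b.find(c, k) (0 ≤ k ≤ len b) is A's skip loop, with -1 for 'no occurrence'
lemma pvFindFrom_eq_skip (t : List Char) (c : Char) (k : Nat) (hk : k ≤ t.length) :
    PySem.Chars.findFrom t [c] (k : Int) none
      = if pvSkipA t c k < t.length then ((pvSkipA t c k : Nat) : Int) else -1 := by
  by_cases h : pvSkipA t c k < t.length
  · rw [if_pos h]
    have hget := pvSkipA_get t c k h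
    have hge := pvSkipA_ge t c k
    have hmemdrop : c ∈ t.drop k := by
      have hidx : (t.drop k)[pvSkipA t c k - k]? = some c := by
        rw [List.getElem?_drop]
        rwa [show k + (pvSkipA t c k - k) = pvSkipA t c k by omega]
      rcases List.getElem?_eq_some_iff.mp hidx with ⟨hlt2, hEq2⟩
      exact hEq2 ▸ List.getElem_mem hlt2
    have hne : PySem.Chars.findFrom t [c] (k : Int) none ≠ -1 := by
      intro hEq
      rw [PySem.Chars.findFrom_natCast_eq_neg_one_iff t [c] k hk,
          pvSingleton_infix_iff] at hEq
      exact hEq hmemdrop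
    obtain ⟨hgef, hpre, hmin⟩ := PySem.Chars.findFrom_natCast_spec t [c] k hk hne
    set f := PySem.Chars.findFrom t [c] (k : Int) none with hf
    have hf0 : 0 ≤ f := le_trans (by exact_mod_cast Nat.zero_le k) hgef
    have hkf : k ≤ f.toNat := by omega
    have hfc : t[f.toNat]? = some c := by
      rw [← List.head?_drop, ← pvSingleton_prefix_iff]
      exact hpre
    -- f.toNat = pvSkipA t c k by mutual minimality
    have h1 : ¬ f.toNat < pvSkipA t c k := fun hlt =>
      pvSkipA_min t c k f.toNat hkf hlt hfc
    have h2 : ¬ pvSkipA t c k < f.toNat := by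
      intro hlt
      apply hmin (pvSkipA t c k) (pvSkipA_ge t c k) hlt
      rw [pvSingleton_prefix_iff, List.head?_drop]
      exact hget
    have : f.toNat = pvSkipA t c k := by omega
    omega
  · rw [if_neg h]
    rw [PySem.Chars.findFrom_natCast_eq_neg_one_iff t [c] k hk, pvSingleton_infix_iff]
    intro hmem
    rcases List.getElem_of_mem hmem with ⟨j, hj, hEq⟩
    have hjlen : k + j < t.length := by
      have := List.length_drop (l := t) (i := k) ▸ hj
      omega
    apply pvSkipA_min t c k (k + j) (by omega) (by omega)
    rw [List.getElem?_eq_getElem hjlen, ← List.getElem_drop (h := hj), hEq]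

-- B's embeds loop (cursor cur = k - 1) is A's subsequence loop at pointer k
lemma pvEmbedsB_eq_subA (b : List Char) : ∀ (a : List Char) (k : Nat), k ≤ b.length →
    pvEmbedsB b a ((k : Int) - 1) = pvSubA b a k := by
  intro a
  induction a with
  | nil => intro k _; rfl
  | cons c rest ih =>
    intro k hk
    simp only [pvEmbedsB, pvSubA]
    rw [show (k : Int) - 1 + 1 = (k : Int) by ring, pvFindFrom_eq_skip b c k hk]
    by_cases h : pvSkipA b c k < b.length
    · rw [if_pos h, dif_pos h]
      have hget := pvSkipA_get b c k h
      rw [List.getElem?_eq_getElem h, Option.some_inj] at hget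
      rw [if_neg (by omega), if_neg (not_not_intro hget)]
      have := ih (pvSkipA b c k + 1) (by omega)
      rw [show ((pvSkipA b c k + 1 : Nat) : Int) - 1 = ((pvSkipA b c k : Nat) : Int) by
        push_cast; ring] at this
      exact this
    · rw [if_neg h, dif_neg h, if_pos (by norm_num)]

lemma pvEmbedsB_neg_one (b a : List Char) : pvEmbedsB b a (-1) = pvSubA b a 0 := by
  have := pvEmbedsB_eq_subA b a 0 (Nat.zero_le _)
  simpa using this

lemma pvSkipA_main (t : List Char) (c : Char) (r : List Char) : ∀ (pt : Nat),
    pvIsSub (c :: r) (t.drop pt)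
      = (if pvSkipA t c pt < t.length then pvIsSub r (t.drop (pvSkipA t c pt + 1)) else false) := by
  intro pt
  induction pt using pvSkipA.induct (t := t) (c := c) with
  | case1 x hx hne ih =>
    rw [pvSkipA_step1 hx hne, List.drop_eq_getElem_cons hx]
    rw [show pvIsSub (c :: r) (t[x] :: t.drop (x + 1))
          = pvIsSub (c :: r) (t.drop (x + 1)) from by
        simp only [pvIsSub]; rw [if_neg (fun h => hne h.symm)]]
    exact ih
  | case2 x hx hne =>
    rw [not_not] at hne
    rw [pvSkipA_step2 hx hne, if_pos hx, List.drop_eq_getElem_cons hx, hne]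
    simp [pvIsSub]
  | case3 x hx =>
    rw [pvSkipA_step3 hx, if_neg hx, List.drop_eq_nil_of_le (Nat.le_of_not_lt hx)]
    rfl

lemma pvSubA_eq (t : List Char) : ∀ (s : List Char) (pt : Nat),
    pvSubA t s pt = pvIsSub s (t.drop pt) := by
  intro s
  induction s with
  | nil => intro pt; simp [pvSubA, pvIsSub]
  | cons c rest ih =>
    intro pt
    rw [pvSkipA_main t c rest pt]
    simp only [pvSubA]
    by_cases h : pvSkipA t c pt < t.length
    · have hceq : t[pvSkipA t c pt]'h = c := by
        have hq := pvSkipA_get t c pt h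
        rwa [List.getElem?_eq_getElem h, Option.some_inj] at hq
      rw [dif_pos h, if_pos h, if_neg (not_not_intro hceq), ih]
    · rw [dif_neg h, if_neg h]

-- greedy subsequence check decides List.Sublist
lemma pvIsSub_iff : ∀ (b a : List Char), pvIsSub a b = true ↔ a.Sublist b := by
  intro b
  induction b with
  | nil =>
    intro a
    cases a with
    | nil => simp [pvIsSub]
    | cons c r => simp [pvIsSub]
  | cons d u ih =>
    intro a
    cases a with
    | nil => simp [pvIsSub]
    | cons c r =>
      by_cases h : c = d
      · subst h
        simp only [pvIsSub, if_true]
        rw [ih r, List.cons_sublist_cons]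
      · simp only [pvIsSub, if_neg h]
        rw [ih (c :: r), List.cons_sublist_cons']
        constructor
        · exact Or.inl
        · rintro (hh | ⟨rfl, _⟩)
          · exact hh
          · exact absurd rfl h

lemma pvFind?_filter_of_imp {α : Type} (l : List α) (p q : α → Bool)
    (h : ∀ a, p a = true → q a = true) : (l.filter q).find? p = l.find? p := by
  induction l with
  | nil => rfl
  | cons a l ih =>
    rw [List.filter_cons]
    by_cases hp : p a = true
    · rw [if_pos (h a hp), List.find?_cons_of_pos hp, List.find?_cons_of_pos hp]
    · have hp' : p a = false := Bool.eq_false_iff.mpr hp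
      rw [List.find?_cons_of_neg (by simp [hp'])]
      by_cases hq : q a = true
      · rw [if_pos hq, List.find?_cons_of_neg (by simp [hp']), ih]
      · rw [if_neg hq, ih]

lemma pvGet?_erase_self (d : PySem.Dict Char Int) (k : Char) :
    (d.erase k).get? k = none := by
  have hfind : (d.items.filter (fun p => !(p.1 == k))).find? (fun p => p.1 == k) = none := by
    apply List.find?_eq_none.mpr
    intro p hp
    have := (List.mem_filter.mp hp).2
    simp only [Bool.not_eq_true', beq_eq_false_iff_ne, ne_eq] at this
    simp [this]
  simp [PySem.Dict.erase, PySem.Dict.get?, hfind]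

lemma pvGet?_erase_ne (d : PySem.Dict Char Int) {k k' : Char} (h : k' ≠ k) :
    (d.erase k).get? k' = d.get? k' := by
  simp only [PySem.Dict.erase, PySem.Dict.get?]
  rw [pvFind?_filter_of_imp]
  intro a ha
  simp only [beq_iff_eq] at ha
  simp [ha, h]

lemma pvNodup_keys_erase (d : PySem.Dict Char Int) (k : Char) (h : d.keys.Nodup) :
    (d.erase k).keys.Nodup := by
  exact List.Nodup.sublist (List.Sublist.map _ List.filter_sublist) h

lemma pvCovA_eq : ∀ (rest : List Char) (bank : PySem.Dict Char Int),
    bank.keys.Nodup →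
    (∀ x : Char, bank.contains x = true ↔ 0 < bank.getD x 0) →
    pvCovA rest bank = rest.all (fun x => decide ((rest.count x : Int) ≤ bank.getD x 0)) := by
  intro rest
  induction rest with
  | nil => intro bank _ _; rfl
  | cons c rest ih =>
    intro bank hnd hinv
    by_cases hc : bank.contains c = true
    · have hv : 0 < bank.getD c 0 := (hinv c).mp hc
      simp only [pvCovA, if_pos hc]
      have hnd1 : (bank.modify c 0 (· - 1)).keys.Nodup := by
        rw [PySem.Dict.keys_modify]
        exact PySem.Dict.nodup_keys_insert _ _ _ hnd
      have hg1 : ∀ x : Char, (bank.modify c 0 (· - 1)).getD x 0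
          = if x = c then bank.getD c 0 - 1 else bank.getD x 0 := by
        intro x; rw [PySem.Dict.getD_modify]
      -- common continuation: bank2 agrees with 'decrement at c' and satisfies the invariant
      suffices hsuf : ∀ bank2 : PySem.Dict Char Int,
          bank2.keys.Nodup →
          (∀ x : Char, bank2.contains x = true ↔ 0 < bank2.getD x 0) →
          (∀ x : Char, bank2.getD x 0 = if x = c then bank.getD c 0 - 1 else bank.getD x 0) →
          pvCovA rest bank2
            = (c :: rest).all (fun x => decide (((c :: rest).count x : Int) ≤ bank.getD x 0)) by
        by_cases hz : (bank.modify c 0 (· - 1)).getD c 0 = 0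
        · rw [if_pos (by simpa using hz)]
          have hzc : bank.getD c 0 - 1 = 0 := by
            have h0 := hg1 c; rw [if_pos rfl] at h0; rw [h0] at hz; exact hz
          apply hsuf
          · exact pvNodup_keys_erase _ _ hnd1
          · intro x
            by_cases hx : x = c
            · rw [hx, PySem.Dict.contains_eq_isSome_get?, pvGet?_erase_self,
                  PySem.Dict.getD_eq_get?_getD, pvGet?_erase_self]
              simp
            · rw [PySem.Dict.contains_eq_isSome_get?, pvGet?_erase_ne _ hx,
                  ← PySem.Dict.contains_eq_isSome_get?,
                  PySem.Dict.contains_modify,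
                  PySem.Dict.getD_eq_get?_getD, pvGet?_erase_ne _ hx,
                  ← PySem.Dict.getD_eq_get?_getD, hg1 x, if_neg hx]
              simp [hx, hinv x]
          · intro x
            by_cases hx : x = c
            · rw [hx, PySem.Dict.getD_eq_get?_getD, pvGet?_erase_self, if_pos rfl]
              simp only [Option.getD_none]
              omega
            · rw [PySem.Dict.getD_eq_get?_getD, pvGet?_erase_ne _ hx,
                  ← PySem.Dict.getD_eq_get?_getD, hg1 x]
        · rw [if_neg (by simpa using hz)]
          have hzc : bank.getD c 0 - 1 ≠ 0 := by
            have h0 := hg1 c; rw [if_pos rfl] at h0; rw [h0] at hz; exact hz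
          apply hsuf
          · exact hnd1
          · intro x
            rw [PySem.Dict.contains_modify, hg1 x]
            by_cases hx : x = c
            · rw [hx]
              simp only [beq_self_eq_true, Bool.true_or, true_iff, reduceIte]
              omega
            · rw [if_neg hx]
              simp [hx, hinv x]
          · exact hg1
      intro bank2 hnd2 hinv2 hg2
      rw [ih bank2 hnd2 hinv2]
      rw [Bool.eq_iff_iff, List.all_eq_true, List.all_eq_true]
      simp only [decide_eq_true_eq]
      constructor
      · intro hall x hx
        rcases List.mem_cons.mp hx with hxc | hxr
        · rw [hxc, List.count_cons_self]
          by_cases hmem : c ∈ rest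
          · have h2 := hall c hmem
            rw [hg2 c, if_pos rfl] at h2
            push_cast
            omega
          · rw [List.count_eq_zero.mpr hmem]
            push_cast
            omega
        · by_cases hxc : x = c
          · rw [hxc, List.count_cons_self]
            have h2 := hall c (hxc ▸ hxr)
            rw [hg2 c, if_pos rfl] at h2
            push_cast at h2 ⊢
            omega
          · have h2 := hall x hxr
            rw [hg2 x, if_neg hxc] at h2
            have hcnt : List.count x (c :: rest) = List.count x rest := by
              simp [Ne.symm hxc]
            rw [hcnt]
            exact h2
      · intro hall x hx
        have hx' := hall x (List.mem_cons_of_mem c hx)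
        by_cases hxc : x = c
        · rw [hxc] at hx' ⊢
          rw [List.count_cons_self] at hx'
          rw [hg2 c, if_pos rfl]
          push_cast at hx' ⊢
          omega
        · have hcnt : List.count x (c :: rest) = List.count x rest := by
            simp [Ne.symm hxc]
          rw [hcnt] at hx'
          rw [hg2 x, if_neg hxc]
          exact hx'
    · have hle : bank.getD c 0 ≤ 0 := by
        by_contra hgt
        exact hc ((hinv c).mpr (by omega))
      simp only [pvCovA, if_neg hc]
      symm
      rw [List.all_cons]
      have hcc : ¬ (((c :: rest).count c : Int) ≤ bank.getD c 0) := by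
        rw [List.count_cons_self]
        push_cast
        omega
      rw [decide_eq_false hcc, Bool.false_and]

-- A's counting pass equals B's subsequence test on the sorted strings
lemma pvCov_eq_embeds (t sp : List Char) :
    pvCovA t (PySem.Dict.counter sp)
      = pvEmbedsB (PySem.List.sorted sp (fun c => c)) (PySem.List.sorted t (fun c => c)) (-1) := by
  rw [pvEmbedsB_neg_one, pvSubA_eq, List.drop_zero]
  rw [pvCovA_eq t (PySem.Dict.counter sp) (PySem.Dict.nodup_keys_counter sp) ?hinv]
  case hinv =>
    intro x
    rw [PySem.Dict.contains_counter, PySem.Dict.getD_counter]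
    simp [List.count_pos_iff]
  have hsub : (PySem.List.sorted t (fun c => c)).Sublist (PySem.List.sorted sp (fun c => c))
      ↔ t.Subperm sp := by
    constructor
    · intro h
      have := h.subperm
      rwa [(PySem.List.sorted_perm t (fun c => c) false).subperm_right,
           (PySem.List.sorted_perm sp (fun c => c) false).subperm_left] at this
    · intro h
      apply List.sublist_of_subperm_of_sortedLE
      · rwa [(PySem.List.sorted_perm t (fun c => c) false).subperm_right,
             (PySem.List.sorted_perm sp (fun c => c) false).subperm_left]
      · exact List.sortedLE_iff_pairwise.mpr (PySem.List.sorted_pairwise t (fun c => c))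
      · exact List.sortedLE_iff_pairwise.mpr (PySem.List.sorted_pairwise sp (fun c => c))
  rw [Bool.eq_iff_iff, List.all_eq_true, pvIsSub_iff, hsub, List.subperm_ext_iff]
  constructor
  · intro hall x hx
    have := hall x hx
    simp only [decide_eq_true_eq, PySem.Dict.getD_counter] at this
    exact_mod_cast this
  · intro hall x hx
    simp only [decide_eq_true_eq, PySem.Dict.getD_counter]
    exact_mod_cast hall x hx

-- ===== VERDICT (by name: the statement is the Claim_ definition above) =====
theorem solve_spec : Claim_equal_solve := by
  intro s t p _
  unfold Spec_solve
  simp only [solve, solve_alt]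
  rw [pvEmbedsB_neg_one, pvCov_eq_embeds]
  by_cases h : pvSubA t.toList s.toList 0
  · rw [if_pos h, h, Bool.true_and]
  · rw [if_neg h, Bool.eq_false_iff.mpr h, Bool.false_and]
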